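-- pv_equiv track=rewrite | github.com/yiyan023/Data-Structures | GCA/Group Chat Mentions.py | solution
-- ===== SOURCE A (Python) =====
-- from collections import defaultdict
--
-- def solution(members: list, messages: list):
--     member_set = set(members)
--     freq_hash = defaultdict(set)
--     res = []
--
--     for i, message in enumerate(messages):
--         words = message.split(" ")
--
--         for word in words:
--             if len(word) and word[0] == "@":
--                 ids = word[1:].split(",")
--
--                 for iden in ids:
--                     if len(iden) and iden in member_set:
--                         freq_hash[iden].add(i)
--
--     members.sort(key=lambda x: (-len(freq_hash[x]), x))
--
--     for member in members:
--         res.append(f"{member}={len(freq_hash[member])}")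
--
--     return res
-- ===== SOURCE B (Python) =====
-- def solution(members: list, messages: list):
--     # Collect one (token, message_index) event per raw mention occurrence.
--     events = []
--     for i, message in enumerate(messages):
--         for word in message.split(" "):
--             if word.startswith("@"):
--                 for t in word[1:].split(","):
--                     if t:
--                         events.append((t, i))
--
--     # Sort-then-scan: duplicates become adjacent, so one linear sweep counts,
--     # for every token, the number of distinct messages mentioning it.
--     events.sort()
--     counts = {}
--     prev = None
--     for e in events:
--         if e != prev:
--             counts[e[0]] = counts.get(e[0], 0) + 1
--             prev = e
--
--     members.sort(key=lambda x: (-counts.get(x, 0), x))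
--     return [f"{member}={counts.get(member, 0)}" for member in members]
-- ===== Notes on version B (the rewrite author's own statement) =====
-- stated objective: alternative
-- what changed: A counts message-major with a dict mapping each member to a set of message indices (filtered through a member set while parsing); B collects a flat list of (token, message-index) mention events with no membership filtering, sorts it, and counts distinct events per token in one run-length scan over the sorted list, then sorts members by the same key.
import Mathlib
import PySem

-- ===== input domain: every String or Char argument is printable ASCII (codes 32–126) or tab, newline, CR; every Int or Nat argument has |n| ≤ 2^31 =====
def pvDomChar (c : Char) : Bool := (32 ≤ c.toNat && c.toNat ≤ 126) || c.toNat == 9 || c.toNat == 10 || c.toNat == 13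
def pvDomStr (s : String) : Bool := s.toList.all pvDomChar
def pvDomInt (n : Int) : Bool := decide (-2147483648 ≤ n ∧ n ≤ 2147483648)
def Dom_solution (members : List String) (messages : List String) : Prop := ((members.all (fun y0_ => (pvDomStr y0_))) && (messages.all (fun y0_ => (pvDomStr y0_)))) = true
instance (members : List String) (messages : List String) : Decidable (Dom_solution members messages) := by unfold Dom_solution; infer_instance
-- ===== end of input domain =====

-- A counts message-major with a dict of per-member index sets; B instead collects a flat list of
-- (token, message-index) mention events, sorts it, and counts by a single run-length scan over the
-- sorted events (no member set, no dict of sets); objective: alternative.  Both A and B sort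
-- `members` in place with the same key, so the observable mutation is identical; the theorems are
-- about the return value.

-- shared helper: s.split(sep) for a non-empty literal sep (split? is some there)
def pvSplit (s sep : String) : List String := (PySem.Str.split? s sep).getD []

-- ===== PORT A =====
def solution (members : List String) (messages : List String) : List String :=
  let memberSet : PySem.Set String := PySem.Set.ofList members
  let freq : PySem.Dict String (PySem.Set Int) :=
    (PySem.List.enumerate messages).foldl (fun d p =>
      (pvSplit p.2 " ").foldl (fun d word =>
        if PySem.Str.len word ≠ 0 ∧ PySem.Str.pyGet? word 0 = some '@' then
          (pvSplit (PySem.Str.slice word (some 1) none) ",").foldl (fun d iden =>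
            if PySem.Str.len iden ≠ 0 ∧ PySem.Set.contains memberSet iden = true then
              d.insert iden ((d.getD iden PySem.Set.empty).add p.1)
            else d) d
        else d) d) PySem.Dict.empty
  let sortedMembers := PySem.List.sorted2 members
    (fun x => -(PySem.Set.len (freq.getD x PySem.Set.empty))) (fun x => x)
  sortedMembers.foldl (fun res member =>
    res ++ [String.ofList (member.toList ++ '=' :: PySem.Int.toChars (PySem.Set.len (freq.getD member PySem.Set.empty)))]) []

-- ===== PORT B =====
def solution_alt (members : List String) (messages : List String) : List String :=
  let events : List (String × Int) :=
    (PySem.List.enumerate messages).foldl (fun ev p =>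
      (pvSplit p.2 " ").foldl (fun ev word =>
        if PySem.Str.startswith word "@" = true then
          (pvSplit (PySem.Str.slice word (some 1) none) ",").foldl (fun ev t =>
            if PySem.Str.len t ≠ 0 then ev ++ [(t, p.1)] else ev) ev
        else ev) ev) []
  let sortedEvents := PySem.List.sorted2 events (fun e => e.1) (fun e => e.2)
  let scan := sortedEvents.foldl (fun st e =>
      if st.2 ≠ some e then (st.1.insert e.1 (st.1.getD e.1 0 + 1), some e) else st)
    ((PySem.Dict.empty : PySem.Dict String Int), (none : Option (String × Int)))
  (PySem.List.sorted2 members (fun x => -(scan.1.getD x 0)) (fun x => x)).map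
    (fun member => String.ofList (member.toList ++ '=' :: PySem.Int.toChars (scan.1.getD member 0)))

-- ===== PRECONDITION & SPEC =====
def Spec_solution (members : List String) (messages : List String) (out : List String) : Prop := out = solution_alt members messages
instance (members : List String) (messages : List String) (out : List String) : Decidable (Spec_solution members messages out) := by unfold Spec_solution; infer_instance

-- ===== CLAIM (what is proved, stated in full; the proofs are below) =====
def Claim_equal_solution : Prop := ∀ (members : List String) (messages : List String), Dom_solution members messages → Spec_solution members messages (solution members messages)

-- ===== LEMMAS AND PROOFS =====

-- x is mentioned by one of the words ws (A's guards) and is a non-empty member id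
abbrev pvMentionW (S : PySem.Set String) (ws : List String) (x : String) : Prop :=
  (∃ w ∈ ws, PySem.Str.startswith w "@" = true ∧
      x ∈ pvSplit (PySem.Str.slice w (some 1) none) ",") ∧
    (PySem.Str.len x ≠ 0 ∧ PySem.Set.contains S x = true)

-- B's token list for one message's word list
abbrev pvToks (ws : List String) : List String :=
  ws.foldl (fun toks word =>
    if PySem.Str.startswith word "@" = true then
      toks ++ (pvSplit (PySem.Str.slice word (some 1) none) ",").filter
        (fun t => decide (PySem.Str.len t ≠ 0))
    else toks) []

lemma pvAddIdem {α : Type} [BEq α] [LawfulBEq α] (s : PySem.Set α) (x : α) :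
    PySem.Set.add (PySem.Set.add s x) x = PySem.Set.add s x :=
  PySem.Set.add_of_mem ((PySem.Set.mem_add s x x).mpr (Or.inr rfl))

lemma pvGuard (w : String) :
    (PySem.Str.len w ≠ 0 ∧ PySem.Str.pyGet? w 0 = some '@') ↔ PySem.Str.startswith w "@" = true := by
  rw [PySem.Str.len_eq, PySem.Str.startswith_eq, PySem.Chars.startswith_iff,
    show ("@".toList) = ['@'] from rfl,
    show ((0:Int)) = ((0:Nat):Int) from rfl, PySem.Str.pyGet?_natCast]
  cases h : w.toList with
  | nil => simp
  | cons c t =>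
    simp only [List.length_cons, List.getElem?_cons_zero, List.cons_prefix_cons,
      Option.some.injEq, List.nil_prefix, and_true]
    constructor
    · rintro ⟨-, rfl⟩; rfl
    · rintro rfl; exact ⟨by positivity, rfl⟩

lemma pvIdsA (S : PySem.Set String) (i : Int) (ids : List String) (d : PySem.Dict String (PySem.Set Int)) (x : String) :
    (ids.foldl (fun d iden =>
        if PySem.Str.len iden ≠ 0 ∧ PySem.Set.contains S iden = true then
          d.insert iden ((d.getD iden PySem.Set.empty).add i)
        else d) d).getD x PySem.Set.empty
    = if x ∈ ids ∧ PySem.Str.len x ≠ 0 ∧ PySem.Set.contains S x = true then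
        (d.getD x PySem.Set.empty).add i
      else d.getD x PySem.Set.empty := by
  induction ids generalizing d with
  | nil => simp
  | cons a t ih =>
    simp only [List.foldl_cons]
    by_cases hP : PySem.Str.len a ≠ 0 ∧ PySem.Set.contains S a = true
    · rw [if_pos hP, ih]
      by_cases hxa : x = a
      · subst hxa
        rw [PySem.Dict.getD_insert_self]
        have hr : x ∈ x :: t ∧ (PySem.Str.len x ≠ 0 ∧ PySem.Set.contains S x = true) :=
          ⟨by simp, hP⟩
        rw [if_pos hr]
        split_ifs with h
        · rw [pvAddIdem]
        · rfl
      · rw [PySem.Dict.getD_insert_of_ne _ _ _ hxa]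
        simp only [List.mem_cons, hxa, false_or]
    · rw [if_neg hP, ih]
      by_cases hxa : x = a
      · subst hxa
        rw [if_neg (fun h => hP h.2), if_neg (fun h => hP h.2)]
      · simp only [List.mem_cons, hxa, false_or]

-- unfolding pvMentionW at a cons
lemma pvMentionW_cons (S : PySem.Set String) (w : String) (ws : List String) (x : String) :
    pvMentionW S (w :: ws) x ↔
      ((PySem.Str.startswith w "@" = true ∧
          x ∈ pvSplit (PySem.Str.slice w (some 1) none) ",") ∧
        (PySem.Str.len x ≠ 0 ∧ PySem.Set.contains S x = true)) ∨ pvMentionW S ws x := by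
  unfold pvMentionW
  rw [List.exists_mem_cons_iff]
  constructor
  · rintro ⟨h | h, hx⟩
    · exact Or.inl ⟨h, hx⟩
    · exact Or.inr ⟨h, hx⟩
  · rintro (⟨h, hx⟩ | ⟨h, hx⟩)
    · exact ⟨Or.inl h, hx⟩
    · exact ⟨Or.inr h, hx⟩

lemma pvWordsA (S : PySem.Set String) (i : Int) (ws : List String) (d : PySem.Dict String (PySem.Set Int)) (x : String) :
    (ws.foldl (fun d word =>
        if PySem.Str.len word ≠ 0 ∧ PySem.Str.pyGet? word 0 = some '@' then
          (pvSplit (PySem.Str.slice word (some 1) none) ",").foldl (fun d iden =>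
            if PySem.Str.len iden ≠ 0 ∧ PySem.Set.contains S iden = true then
              d.insert iden ((d.getD iden PySem.Set.empty).add i)
            else d) d
        else d) d).getD x PySem.Set.empty
    = if pvMentionW S ws x then (d.getD x PySem.Set.empty).add i else d.getD x PySem.Set.empty := by
  induction ws generalizing d with
  | nil => simp [pvMentionW]
  | cons w ws ih =>
    simp only [List.foldl_cons]
    simp only [pvMentionW_cons]
    by_cases hG : PySem.Str.startswith w "@" = true
    · rw [if_pos ((pvGuard w).mpr hG), ih, pvIdsA]
      by_cases hM : pvMentionW S ws x
      · rw [if_pos hM, if_pos (Or.inr hM)]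
        by_cases hc : x ∈ pvSplit (PySem.Str.slice w (some 1) none) "," ∧
            PySem.Str.len x ≠ 0 ∧ PySem.Set.contains S x = true
        · rw [if_pos hc, pvAddIdem]
        · rw [if_neg hc]
      · rw [if_neg hM]
        by_cases hc : x ∈ pvSplit (PySem.Str.slice w (some 1) none) "," ∧
            PySem.Str.len x ≠ 0 ∧ PySem.Set.contains S x = true
        · rw [if_pos hc, if_pos (Or.inl ⟨⟨hG, hc.1⟩, hc.2⟩)]
        · rw [if_neg hc, if_neg ?_]
          rintro (⟨⟨-, hm⟩, hx⟩ | h)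
          · exact hc ⟨hm, hx⟩
          · exact hM h
    · rw [if_neg (fun hA => hG ((pvGuard w).mp hA)), ih]
      by_cases hM : pvMentionW S ws x
      · rw [if_pos hM, if_pos (Or.inr hM)]
      · rw [if_neg hM, if_neg ?_]
        rintro (⟨⟨hg, -⟩, -⟩ | h)
        · exact hG hg
        · exact hM h

-- membership in B's per-message token list
lemma pvToksAux (ws : List String) (acc : List String) (x : String) :
    x ∈ ws.foldl (fun toks word =>
        if PySem.Str.startswith word "@" = true then
          toks ++ (pvSplit (PySem.Str.slice word (some 1) none) ",").filter
            (fun t => decide (PySem.Str.len t ≠ 0))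
        else toks) acc
    ↔ x ∈ acc ∨ ∃ w ∈ ws, PySem.Str.startswith w "@" = true ∧
        x ∈ pvSplit (PySem.Str.slice w (some 1) none) "," ∧ PySem.Str.len x ≠ 0 := by
  induction ws generalizing acc with
  | nil => simp
  | cons w ws ih =>
    simp only [List.foldl_cons]
    by_cases hG : PySem.Str.startswith w "@" = true
    · rw [if_pos hG, ih]
      simp only [List.mem_append, List.mem_filter, List.mem_cons, decide_eq_true_eq]
      constructor
      · rintro ((h | ⟨hm, hx⟩) | ⟨v, hv, h⟩)
        · exact Or.inl h
        · exact Or.inr ⟨w, Or.inl rfl, hG, hm, hx⟩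
        · exact Or.inr ⟨v, Or.inr hv, h⟩
      · rintro (h | ⟨v, (rfl | hv), hg, hm, hx⟩)
        · exact Or.inl (Or.inl h)
        · exact Or.inl (Or.inr ⟨hm, hx⟩)
        · exact Or.inr ⟨v, hv, hg, hm, hx⟩
    · rw [if_neg hG, ih]
      constructor
      · rintro (h | ⟨v, hv, h⟩)
        · exact Or.inl h
        · exact Or.inr ⟨v, List.mem_cons_of_mem _ hv, h⟩
      · rintro (h | ⟨v, hv, h⟩)
        · exact Or.inl h
        · rcases List.mem_cons.mp hv with rfl | hv
          · exact absurd h.1 hG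
          · exact Or.inr ⟨v, hv, h⟩

lemma pvMention_toks (S : PySem.Set String) (ws : List String) (x : String)
    (hc : PySem.Set.contains S x = true) :
    pvMentionW S ws x ↔ x ∈ pvToks ws := by
  unfold pvToks
  rw [pvToksAux]
  simp only [List.not_mem_nil, false_or]
  constructor
  · rintro ⟨⟨w, hw, hg, hm⟩, hx, -⟩
    exact ⟨w, hw, hg, hm, hx⟩
  · rintro ⟨w, hw, hg, hm, hx⟩
    exact ⟨⟨w, hw, hg, hm⟩, hx, hc⟩

-- A's dict fold: the size of x's index set grows by the number of mentioning messages
lemma pvOuterA (S : PySem.Set String) (msgs : List String) :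
    ∀ (n : Int) (d : PySem.Dict String (PySem.Set Int)),
    (∀ x j, j ∈ d.getD x PySem.Set.empty → j < n) →
    ∀ x,
    PySem.Set.len (((PySem.List.enumerate msgs n).foldl (fun d p =>
        (pvSplit p.2 " ").foldl (fun d word =>
          if PySem.Str.len word ≠ 0 ∧ PySem.Str.pyGet? word 0 = some '@' then
            (pvSplit (PySem.Str.slice word (some 1) none) ",").foldl (fun d iden =>
              if PySem.Str.len iden ≠ 0 ∧ PySem.Set.contains S iden = true then
                d.insert iden ((d.getD iden PySem.Set.empty).add p.1)
              else d) d
          else d) d) d).getD x PySem.Set.empty)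
    = PySem.Set.len (d.getD x PySem.Set.empty)
      + ((msgs.countP (fun m => decide (pvMentionW S (pvSplit m " ") x))) : Int) := by
  induction msgs with
  | nil =>
    intro n d h1 x
    rw [PySem.List.enumerate_nil]
    simp
  | cons m ms ih =>
    intro n d h1 x
    rw [PySem.List.enumerate_cons]
    simp only [List.foldl_cons]
    rw [ih (n + 1) _ ?_ x]
    · rw [pvWordsA, List.countP_cons]
      by_cases hM : pvMentionW S (pvSplit m " ") x
      · rw [if_pos hM]
        have hn : (n, m).1 ∉ d.getD x PySem.Set.empty := fun hmem => by
          have := h1 x _ hmem; exact absurd this (lt_irrefl n)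
        rw [PySem.Set.add_of_not_mem hn]
        rw [decide_eq_true hM]
        simp only [PySem.Set.len, List.length_append, List.length_cons, List.length_nil]
        push_cast
        ring
      · rw [if_neg hM, decide_eq_false hM]
        push_cast
        ring
    · intro y j hj
      rw [pvWordsA] at hj
      by_cases hM : pvMentionW S (pvSplit m " ") y
      · rw [if_pos hM] at hj
        rcases (PySem.Set.mem_add _ _ _).mp hj with h | h
        · have := h1 y j h; omega
        · rw [h]; exact lt_add_one n
      · rw [if_neg hM] at hj
        have := h1 y j hj; omega

-- lexicographic ≤ on mention events (Python's tuple order)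
abbrev pvLe (a b : String × Int) : Prop := a.1 < b.1 ∨ (a.1 = b.1 ∧ a.2 ≤ b.2)

-- sorted2's comparison for keys (fst, snd)
abbrev pvBf (a b : String × Int) : Bool :=
  decide (a.1 < b.1) || (!decide (b.1 < a.1) && decide (a.2 < b.2))

lemma pvLe_trans {a b c : String × Int} (h1 : pvLe a b) (h2 : pvLe b c) : pvLe a c := by
  rcases h1 with h1 | ⟨h1, h1'⟩ <;> rcases h2 with h2 | ⟨h2, h2'⟩
  · exact Or.inl (lt_trans h1 h2)
  · exact Or.inl (h2 ▸ h1)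
  · exact Or.inl (h1 ▸ h2)
  · exact Or.inr ⟨h1.trans h2, le_trans h1' h2'⟩

lemma pvLe_antisymm {a b : String × Int} (h1 : pvLe a b) (h2 : pvLe b a) : a = b := by
  rcases h1 with h1 | ⟨h1, h1'⟩ <;> rcases h2 with h2 | ⟨h2, h2'⟩
  · exact absurd h2 (lt_asymm h1)
  · exact absurd h1 (h2 ▸ lt_irrefl _)
  · exact absurd h2 (h1 ▸ lt_irrefl _)
  · exact Prod.ext h1 (le_antisymm h1' h2')

lemma pvBf_le {a b : String × Int} (h : pvBf a b = true) : pvLe a b := by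
  rw [show pvBf a b = (decide (a.1 < b.1) || (!decide (b.1 < a.1) && decide (a.2 < b.2))) from rfl,
    Bool.or_eq_true, Bool.and_eq_true] at h
  rcases h with h | ⟨h1, h2⟩
  · exact Or.inl (of_decide_eq_true h)
  · have h1' : ¬ b.1 < a.1 := by simpa using h1
    have h2' : a.2 < b.2 := of_decide_eq_true h2
    by_cases hab : a.1 < b.1
    · exact Or.inl hab
    · exact Or.inr ⟨le_antisymm (not_lt.mp h1') (not_lt.mp hab), le_of_lt h2'⟩

lemma pvBf_not {a b : String × Int} (h : pvBf a b = false) : pvLe b a := by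
  rw [show pvBf a b = (decide (a.1 < b.1) || (!decide (b.1 < a.1) && decide (a.2 < b.2))) from rfl,
    Bool.or_eq_false_iff, Bool.and_eq_false_iff] at h
  obtain ⟨h1, h2⟩ := h
  have h1' : ¬ a.1 < b.1 := of_decide_eq_false h1
  rcases h2 with h2 | h2
  · have hba : b.1 < a.1 := by simpa using h2
    exact Or.inl hba
  · have h2' : ¬ a.2 < b.2 := of_decide_eq_false h2
    by_cases hba : b.1 < a.1
    · exact Or.inl hba
    · exact Or.inr ⟨le_antisymm (not_lt.mp h1') (not_lt.mp hba), not_lt.mp h2'⟩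

lemma pvInsertBy_pairwise (x : String × Int) (ys : List (String × Int))
    (h : ys.Pairwise pvLe) : (PySem.List.insertBy pvBf x ys).Pairwise pvLe := by
  induction ys with
  | nil => simp [PySem.List.insertBy]
  | cons y t ih =>
    simp only [PySem.List.insertBy]
    rcases List.pairwise_cons.mp h with ⟨hy, ht⟩
    by_cases hb : pvBf x y = true
    · rw [if_pos hb]
      refine List.pairwise_cons.mpr ⟨?_, h⟩
      intro z hz
      rcases List.mem_cons.mp hz with rfl | hz
      · exact pvBf_le hb
      · exact pvLe_trans (pvBf_le hb) (hy z hz)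
    · rw [if_neg hb]
      refine List.pairwise_cons.mpr ⟨?_, ih ht⟩
      intro z hz
      rcases (PySem.List.mem_insertBy _ _ _ _).mp hz with rfl | hz
      · exact pvBf_not (Bool.eq_false_iff.mpr hb)
      · exact hy z hz

lemma pvSorted2_pairwise (xs : List (String × Int)) :
    (PySem.List.sorted2 xs (fun e => e.1) (fun e => e.2) false).Pairwise pvLe := by
  simp only [PySem.List.sorted2, if_neg Bool.false_ne_true]
  have main : ∀ (l acc : List (String × Int)), acc.Pairwise pvLe →
      (l.foldl (fun acc x => PySem.List.insertBy pvBf x acc) acc).Pairwise pvLe := by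
    intro l
    induction l with
    | nil => intro acc h; exact h
    | cons a t ih =>
      intro acc h
      exact ih _ (pvInsertBy_pairwise a acc h)
  exact main xs [] List.Pairwise.nil

-- the run-length scan over a sorted event list counts distinct events per token
lemma pvScan (l : List (String × Int)) :
    ∀ (c : PySem.Dict String Int) (prev : Option (String × Int)),
    l.Pairwise pvLe →
    (∀ p, prev = some p → ∀ e ∈ l, pvLe p e) →
    ∀ x,
    (l.foldl (fun st e =>
        if st.2 ≠ some e then (st.1.insert e.1 (st.1.getD e.1 0 + 1), some e) else st)
      (c, prev)).1.getD x 0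
    = c.getD x 0
      + (((PySem.Set.ofList l).countP (fun e => decide (e.1 = x) && decide (some e ≠ prev))) : Int) := by
  induction l with
  | nil =>
    intro c prev _ _ x
    rw [show PySem.Set.ofList ([] : List (String × Int)) = [] from rfl]
    simp
  | cons e t ih =>
    intro c prev hpair hp x
    rcases List.pairwise_cons.mp hpair with ⟨he, ht⟩
    simp only [List.foldl_cons]
    rw [PySem.Set.ofList_cons, List.countP_cons]
    by_cases hpe : prev = some e
    · rw [if_neg (not_not_intro hpe)]
      rw [ih c prev ht (fun p hpp f hf => hp p hpp f (List.mem_cons_of_mem _ hf)) x]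
      have hpe' : decide (some e ≠ prev) = false :=
        decide_eq_false (fun hcon => hcon hpe.symm)
      rw [hpe', Bool.and_false]
      simp only [Bool.false_eq_true, if_false, Nat.add_zero]
      have : List.countP (fun f => decide (f.1 = x) && decide (some f ≠ prev))
          ((PySem.Set.ofList t).discard e)
          = List.countP (fun f => decide (f.1 = x) && decide (some f ≠ prev))
            (PySem.Set.ofList t) := by
        show List.countP _ (List.filter _ _) = _
        rw [List.countP_filter]
        refine List.countP_congr ?_
        intro y _
        by_cases hye : y = e
        · subst hye; simp [hpe]
        · simp [hye]
      rw [this]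
    · rw [if_pos (show ((c, prev).2 ≠ some e) from hpe)]
      rw [ih _ (some e) ht (fun p hpp f hf => by cases hpp; exact he f hf) x]
      have hcnt : List.countP (fun f => decide (f.1 = x) && decide (some f ≠ prev))
          ((PySem.Set.ofList t).discard e)
          = List.countP (fun f => decide (f.1 = x) && decide (some f ≠ some e))
            (PySem.Set.ofList t) := by
        show List.countP _ (List.filter _ _) = _
        rw [List.countP_filter]
        refine List.countP_congr ?_
        intro y hy
        by_cases hye : y = e
        · subst hye; simp
        · have hyprev : some y ≠ prev := by
            intro hc
            have h1 : pvLe y e := hp y hc.symm e (List.mem_cons_self)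
            have h2 : pvLe e y := he y ((PySem.Set.mem_ofList _ _).mp hy)
            exact hye (pvLe_antisymm h1 h2)
          simp [hye, hyprev]
      rw [hcnt]
      rw [PySem.Dict.getD_insert]
      have hpre : decide (some e ≠ prev) = true :=
        decide_eq_true (fun hh => hpe hh.symm)
      rw [hpre, Bool.and_true]
      by_cases hex : x = e.1
      · subst hex
        simp only [decide_true, if_true]
        push_cast
        ring
      · rw [if_neg hex, if_neg (by simp only [decide_eq_true_eq]; exact fun h => hex h.symm)]
        push_cast
        ring

-- the nested event-collecting folds produce a flatMap of per-message token blocks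
lemma pvEvInner (ids : List String) (i : Int) :
    ∀ ev : List (String × Int),
    ids.foldl (fun ev t => if PySem.Str.len t ≠ 0 then ev ++ [(t, i)] else ev) ev
    = ev ++ (ids.filter (fun t => decide (PySem.Str.len t ≠ 0))).map (fun t => (t, i)) := by
  induction ids with
  | nil => intro ev; simp
  | cons a t ih =>
    intro ev
    simp only [List.foldl_cons, List.filter_cons]
    by_cases ha : PySem.Str.len a ≠ 0
    · rw [if_pos ha, ih]
      have ha' : ¬ a = "" := by simpa using ha
      simp [ha']
    · rw [if_neg ha, ih]
      have ha' : a = "" := by simpa using ha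
      simp [ha']

lemma pvToksAcc (ws : List String) :
    ∀ acc : List String,
    ws.foldl (fun toks word =>
        if PySem.Str.startswith word "@" = true then
          toks ++ (pvSplit (PySem.Str.slice word (some 1) none) ",").filter
            (fun t => decide (PySem.Str.len t ≠ 0))
        else toks) acc
    = acc ++ ws.foldl (fun toks word =>
        if PySem.Str.startswith word "@" = true then
          toks ++ (pvSplit (PySem.Str.slice word (some 1) none) ",").filter
            (fun t => decide (PySem.Str.len t ≠ 0))
        else toks) [] := by
  induction ws with
  | nil => intro acc; simp
  | cons w ws ih =>
    intro acc
    simp only [List.foldl_cons]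
    rw [ih]
    conv_rhs => rw [ih]
    split_ifs <;> simp

lemma pvEvWords (ws : List String) (i : Int) :
    ∀ ev : List (String × Int),
    ws.foldl (fun ev word =>
        if PySem.Str.startswith word "@" = true then
          (pvSplit (PySem.Str.slice word (some 1) none) ",").foldl (fun ev t =>
            if PySem.Str.len t ≠ 0 then ev ++ [(t, i)] else ev) ev
        else ev) ev
    = ev ++ (pvToks ws).map (fun t => (t, i)) := by
  induction ws with
  | nil => intro ev; simp [pvToks]
  | cons w ws ih =>
    intro ev
    simp only [List.foldl_cons]
    rw [pvToksAcc]
    by_cases hG : PySem.Str.startswith w "@" = true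
    · rw [if_pos hG, if_pos hG, pvEvInner, ih]
      simp [pvToks, List.map_append, List.append_assoc]
    · rw [if_neg hG, if_neg hG, ih]
      simp [pvToks]

lemma pvEventsNF (msgs : List String) :
    ∀ (n : Int) (ev : List (String × Int)),
    (PySem.List.enumerate msgs n).foldl (fun ev p =>
      (pvSplit p.2 " ").foldl (fun ev word =>
        if PySem.Str.startswith word "@" = true then
          (pvSplit (PySem.Str.slice word (some 1) none) ",").foldl (fun ev t =>
            if PySem.Str.len t ≠ 0 then ev ++ [(t, p.1)] else ev) ev
        else ev) ev) ev
    = ev ++ (PySem.List.enumerate msgs n).flatMap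
        (fun p => (pvToks (pvSplit p.2 " ")).map (fun t => (t, p.1))) := by
  induction msgs with
  | nil => intro n ev; rw [PySem.List.enumerate_nil]; simp
  | cons m ms ih =>
    intro n ev
    rw [PySem.List.enumerate_cons]
    simp only [List.foldl_cons, List.flatMap_cons]
    rw [pvEvWords, ih, List.append_assoc]

lemma pvEventsSnd (msgs : List String) :
    ∀ (n : Int) (y : String × Int),
    y ∈ (PySem.List.enumerate msgs n).flatMap
        (fun p => (pvToks (pvSplit p.2 " ")).map (fun t => (t, p.1))) → n ≤ y.2 := by
  induction msgs with
  | nil => intro n y h; rw [PySem.List.enumerate_nil] at h; simp at h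
  | cons m ms ih =>
    intro n y h
    rw [PySem.List.enumerate_cons] at h
    simp only [List.flatMap_cons, List.mem_append] at h
    rcases h with h | h
    · obtain ⟨t, _, rfl⟩ := List.mem_map.mp h
      exact le_refl n
    · have := ih (n + 1) y h
      omega

lemma pvCountBlock (toks : List String) (n : Int) (x : String) :
    (PySem.Set.ofList (toks.map (fun t => (t, n)))).countP (fun e => decide (e.1 = x))
    = if x ∈ toks then 1 else 0 := by
  have hcongr : (PySem.Set.ofList (toks.map (fun t => (t, n)))).countP (fun e => decide (e.1 = x))
      = (PySem.Set.ofList (toks.map (fun t => (t, n)))).countP (fun e => e == (x, n)) := by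
    refine List.countP_congr ?_
    intro e he
    obtain ⟨t, _, rfl⟩ := List.mem_map.mp ((PySem.Set.mem_ofList _ _).mp he)
    constructor
    · intro h
      have : t = x := of_decide_eq_true h
      subst this; simp
    · intro h
      have : (t, n) = (x, n) := eq_of_beq h
      rw [Prod.mk.injEq] at this
      simp [this.1]
  rw [hcongr]
  show List.count (x, n) (PySem.Set.ofList (toks.map (fun t => (t, n)))) = _
  by_cases hx : x ∈ toks
  · rw [if_pos hx]
    refine List.count_eq_one_of_mem (PySem.Set.nodup_ofList _) ?_
    rw [PySem.Set.mem_ofList]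
    exact List.mem_map.mpr ⟨x, hx, rfl⟩
  · rw [if_neg hx]
    refine List.count_eq_zero_of_not_mem ?_
    rw [PySem.Set.mem_ofList]
    intro h
    obtain ⟨t, ht, heq⟩ := List.mem_map.mp h
    rw [Prod.mk.injEq] at heq
    exact hx (heq.1 ▸ ht)

lemma pvCountEvents (msgs : List String) :
    ∀ (n : Int) (x : String),
    (PySem.Set.ofList ((PySem.List.enumerate msgs n).flatMap
        (fun p => (pvToks (pvSplit p.2 " ")).map (fun t => (t, p.1))))).countP
      (fun e => decide (e.1 = x))
    = msgs.countP (fun m => decide (x ∈ pvToks (pvSplit m " "))) := by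
  induction msgs with
  | nil => intro n x; rw [PySem.List.enumerate_nil]; simp [PySem.Set.ofList]
  | cons m ms ih =>
    intro n x
    rw [PySem.List.enumerate_cons]
    simp only [List.flatMap_cons]
    rw [PySem.Set.ofList_append, PySem.Set.update_eq_append_filter, List.countP_append]
    have hfilter : (PySem.Set.ofList ((PySem.List.enumerate ms (n + 1)).flatMap
          (fun p => (pvToks (pvSplit p.2 " ")).map (fun t => (t, p.1))))).filter
        (fun y => !(PySem.Set.contains
          (PySem.Set.ofList ((pvToks (pvSplit m " ")).map (fun t => (t, n)))) y))
        = PySem.Set.ofList ((PySem.List.enumerate ms (n + 1)).flatMap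
          (fun p => (pvToks (pvSplit p.2 " ")).map (fun t => (t, p.1)))) := by
      refine List.filter_eq_self.mpr ?_
      intro y hy
      have hy2 : (n : Int) + 1 ≤ y.2 :=
        pvEventsSnd ms (n + 1) y ((PySem.Set.mem_ofList _ _).mp hy)
      have hcf : PySem.Set.contains
          (PySem.Set.ofList ((pvToks (pvSplit m " ")).map (fun t => (t, n)))) y = false := by
        cases hb : PySem.Set.contains
            (PySem.Set.ofList ((pvToks (pvSplit m " ")).map (fun t => (t, n)))) y with
        | false => rfl
        | true =>
          exfalso
          have hmem := (PySem.Set.contains_iff _ _).mp hb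
          obtain ⟨t, _, heq⟩ := List.mem_map.mp ((PySem.Set.mem_ofList _ _).mp hmem)
          have hyn : y.2 = n := by rw [← heq]
          omega
      rw [hcf]
      rfl
    rw [hfilter, ih (n + 1) x, pvCountBlock, List.countP_cons]
    by_cases hx : x ∈ pvToks (pvSplit m " ")
    · simp [hx]; omega
    · simp [hx]

lemma pvCountOfListPerm (l1 l2 : List (String × Int)) (h : l1.Perm l2)
    (p : String × Int → Bool) :
    (PySem.Set.ofList l1).countP p = (PySem.Set.ofList l2).countP p := by
  refine List.Perm.countP_eq p ?_
  refine (List.perm_ext_iff_of_nodup (PySem.Set.nodup_ofList _) (PySem.Set.nodup_ofList _)).mpr ?_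
  intro a
  rw [PySem.Set.mem_ofList, PySem.Set.mem_ofList, h.mem_iff]

-- insertBy only looks at `before` on the inserted element vs list elements
lemma pvInsertByCongr {α : Type} (b1 b2 : α → α → Bool) (x : α) (ys : List α)
    (h : ∀ y ∈ ys, b1 x y = b2 x y) :
    PySem.List.insertBy b1 x ys = PySem.List.insertBy b2 x ys := by
  induction ys with
  | nil => rfl
  | cons y ys ih =>
    simp only [PySem.List.insertBy]
    rw [h y (by simp)]
    split_ifs
    · rfl
    · rw [ih (fun z hz => h z (List.mem_cons_of_mem _ hz))]

lemma pvFoldlInsertByCongr {α : Type} (b1 b2 : α → α → Bool) (P : α → Prop)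
    (hb : ∀ a b, P a → P b → b1 a b = b2 a b) :
    ∀ (xs acc : List α), (∀ a ∈ xs, P a) → (∀ a ∈ acc, P a) →
    xs.foldl (fun acc x => PySem.List.insertBy b1 x acc) acc
      = xs.foldl (fun acc x => PySem.List.insertBy b2 x acc) acc := by
  intro xs
  induction xs with
  | nil => intro acc _ _; rfl
  | cons x xs ih =>
    intro acc hxs hacc
    simp only [List.foldl_cons]
    have hx : P x := hxs x (by simp)
    rw [pvInsertByCongr b1 b2 x acc (fun y hy => hb x y hx (hacc y hy))]
    refine ih _ (fun a ha => hxs a (List.mem_cons_of_mem _ ha)) ?_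
    intro a ha
    rcases (PySem.List.mem_insertBy _ _ _ _).mp ha with rfl | ha
    · exact hx
    · exact hacc a ha

-- sorted2 with identical second key depends only on the first key's values on the list
lemma pvSorted2Congr (xs : List String) (f g : String → Int)
    (h : ∀ x ∈ xs, f x = g x) :
    PySem.List.sorted2 xs f (fun x => x) false = PySem.List.sorted2 xs g (fun x => x) false := by
  simp only [PySem.List.sorted2, if_neg (Bool.false_ne_true)]
  refine pvFoldlInsertByCongr _ _ (· ∈ xs) ?_ xs [] (fun a ha => ha) (by simp)
  intro a b ha hb
  rw [h a ha, h b hb]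

-- ===== VERDICT (by name: the statement is the Claim_ definition above) =====
theorem solution_spec : Claim_equal_solution := by
  intro members messages _
  unfold Spec_solution
  show solution members messages = solution_alt members messages
  unfold solution solution_alt
  dsimp only
  rw [PySem.List.foldl_append_singleton_eq_map, List.nil_append]
  have hcnt : ∀ x ∈ members,
      PySem.Set.len (((PySem.List.enumerate messages).foldl (fun d p =>
          (pvSplit p.2 " ").foldl (fun d word =>
            if PySem.Str.len word ≠ 0 ∧ PySem.Str.pyGet? word 0 = some '@' then
              (pvSplit (PySem.Str.slice word (some 1) none) ",").foldl (fun d iden =>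
                if PySem.Str.len iden ≠ 0 ∧ PySem.Set.contains (PySem.Set.ofList members) iden = true then
                  d.insert iden ((d.getD iden PySem.Set.empty).add p.1)
                else d) d
            else d) d) PySem.Dict.empty).getD x PySem.Set.empty)
      = ((PySem.List.sorted2 ((PySem.List.enumerate messages).foldl (fun ev p =>
            (pvSplit p.2 " ").foldl (fun ev word =>
              if PySem.Str.startswith word "@" = true then
                (pvSplit (PySem.Str.slice word (some 1) none) ",").foldl (fun ev t =>
                  if PySem.Str.len t ≠ 0 then ev ++ [(t, p.1)] else ev) ev
              else ev) ev) []) (fun e => e.1) (fun e => e.2)).foldl (fun st e =>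
            if st.2 ≠ some e then (st.1.insert e.1 (st.1.getD e.1 0 + 1), some e) else st)
          ((PySem.Dict.empty : PySem.Dict String Int), (none : Option (String × Int)))).1.getD x 0 := by
    intro x hx
    have hc : PySem.Set.contains (PySem.Set.ofList members) x = true :=
      (PySem.Set.contains_iff _ _).mpr ((PySem.Set.mem_ofList _ _).mpr hx)
    -- A side: size of x's index set = number of mentioning messages
    have hA := pvOuterA (PySem.Set.ofList members) messages 0 PySem.Dict.empty
      (by
        intro y j hj
        rw [PySem.Dict.getD_empty, show (PySem.Set.empty : PySem.Set Int) = [] from rfl] at hj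
        cases hj) x
    have hPQ : List.countP (fun m => decide (pvMentionW (PySem.Set.ofList members) (pvSplit m " ") x)) messages
        = List.countP (fun m => decide (x ∈ pvToks (pvSplit m " "))) messages :=
      List.countP_congr (fun m _ =>
        by simp only [decide_eq_true_eq]; exact pvMention_toks (PySem.Set.ofList members) (pvSplit m " ") x hc)
    rw [hA, PySem.Dict.getD_empty, hPQ, show PySem.Set.len PySem.Set.empty = 0 from rfl, zero_add]
    -- B side: the scan over the sorted events counts distinct events per token
    rw [pvEventsNF messages 0 [], List.nil_append]
    have hpw := pvSorted2_pairwise ((PySem.List.enumerate messages 0).flatMap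
      (fun p => (pvToks (pvSplit p.2 " ")).map (fun t => (t, p.1))))
    have hscan := pvScan _ PySem.Dict.empty none hpw (by intro p hp; cases hp) x
    rw [hscan, PySem.Dict.getD_empty, zero_add]
    have hdrop : ((PySem.Set.ofList (PySem.List.sorted2 ((PySem.List.enumerate messages 0).flatMap
          (fun p => (pvToks (pvSplit p.2 " ")).map (fun t => (t, p.1)))) (fun e => e.1) (fun e => e.2) false)).countP
        (fun e => decide (e.1 = x) && decide (some e ≠ (none : Option (String × Int)))))
        = ((PySem.Set.ofList ((PySem.List.enumerate messages 0).flatMap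
          (fun p => (pvToks (pvSplit p.2 " ")).map (fun t => (t, p.1))))).countP
        (fun e => decide (e.1 = x))) := by
      rw [pvCountOfListPerm _ _ (PySem.List.sorted2_perm _ _ _ false)]
      refine List.countP_congr ?_
      intro e _
      simp
    rw [hdrop, pvCountEvents messages 0 x]
  have hsort := pvSorted2Congr members
    (fun x => -(PySem.Set.len (((PySem.List.enumerate messages).foldl (fun d p =>
          (pvSplit p.2 " ").foldl (fun d word =>
            if PySem.Str.len word ≠ 0 ∧ PySem.Str.pyGet? word 0 = some '@' then
              (pvSplit (PySem.Str.slice word (some 1) none) ",").foldl (fun d iden =>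
                if PySem.Str.len iden ≠ 0 ∧ PySem.Set.contains (PySem.Set.ofList members) iden = true then
                  d.insert iden ((d.getD iden PySem.Set.empty).add p.1)
                else d) d
            else d) d) PySem.Dict.empty).getD x PySem.Set.empty)))
    (fun x => -(((PySem.List.sorted2 ((PySem.List.enumerate messages).foldl (fun ev p =>
            (pvSplit p.2 " ").foldl (fun ev word =>
              if PySem.Str.startswith word "@" = true then
                (pvSplit (PySem.Str.slice word (some 1) none) ",").foldl (fun ev t =>
                  if PySem.Str.len t ≠ 0 then ev ++ [(t, p.1)] else ev) ev
              else ev) ev) []) (fun e => e.1) (fun e => e.2)).foldl (fun st e =>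
            if st.2 ≠ some e then (st.1.insert e.1 (st.1.getD e.1 0 + 1), some e) else st)
          ((PySem.Dict.empty : PySem.Dict String Int), (none : Option (String × Int)))).1.getD x 0))
    (fun x hx => by beta_reduce; rw [hcnt x hx])
  rw [hsort]
  refine List.map_congr_left ?_
  intro m hm
  have hmem : m ∈ members :=
    (PySem.List.sorted2_perm members _ _ false).mem_iff.mp hm
  rw [hcnt m hmem]
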